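-- pv_equiv track=rewrite | github.com/XYZboom/codeql-depends-verify | main.py | hardcoded_name_resolve
-- ===== SOURCE A (Python) =====
-- from typing import List, Callable, Dict, Union, Set
--
-- class PredictAndParse:
--     def __init__(self, _predict: Union[Callable[[str], bool], List[Callable[[str], bool]]],
--                  _parse: Callable[[str], str]):
--         self._predict = _predict
--         self._parse = _parse
--
--     def predict(self, _s: str) -> bool:
--         if type(self._predict) is list:
--             for _p in self._predict:
--                 if not _p(_s):
--                     return False
--             return True
--         return self._predict(_s)
--
--     def parse(self, _s: str) -> str:
--         return self._parse(_s)
--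
-- def handle(_s: str, _handlers: Dict[str, PredictAndParse]) -> Set[str]:
--     _result = set()
--     for _h in _handlers.values():
--         if _h.predict(_s):
--             _result.add(_h.parse(_s))
--     return _result
--
-- def hardcoded_name_resolve(_name: str) -> Set[str]:
--     _l = _name.split(".")
--
--     def has_private(_s: str) -> bool:
--         return "$private" in _s
--
--     def is_getter(_s: str) -> bool:
--         return _s.replace("$private", "").split(".")[-1].startswith("get")
--
--     def is_setter(_s: str) -> bool:
--         return _s.replace("$private", "").split(".")[-1].startswith("set")
--
--     def getterBack0(_s: str) -> str:
--         _s = _s.replace("$private", "")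
--         __l = _s.split(".")
--         __l[-1] = __l[-1].replace("get", "")
--         __l[-1] = __l[-1].replace(__l[-1][0], __l[-1][0].lower())
--         return ".".join(__l)
--
--     def setterBack0(_s: str) -> str:
--         _s = _s.replace("$private", "")
--         __l = _s.split(".")
--         __l[-1] = __l[-1].replace("set", "")
--         __l[-1] = __l[-1].replace(__l[-1][0], __l[-1][0].lower())
--         return ".".join(__l)
--
--     def getterBack1(_s: str) -> str:
--         _s = _s.replace("$private", "")
--         __l = _s.split(".")
--         __l[-1] = __l[-1].replace("get", "")
--         __l[-1] = __l[-1].replace(__l[-1][0], __l[-1][0])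
--         return ".".join(__l)
--
--     def setterBack1(_s: str) -> str:
--         _s = _s.replace("$private", "")
--         __l = _s.split(".")
--         __l[-1] = __l[-1].replace("set", "")
--         __l[-1] = __l[-1].replace(__l[-1][0], __l[-1][0])
--         return ".".join(__l)
--
--     def someEleContainsKt(_s: str) -> bool:
--         return any((_i.endswith("Kt") for _i in _s.split(".")))
--
--     def removeEleContainsKt(_s: str):
--         _s = _s.replace("$", ".")
--         return ".".join(filter(lambda _s1: not _s1.endswith("Kt"), _s.split(".")))
--
--     def containsDollar(_s: str):
--         return "$" in _s
--
--     def removeStrBeforeDollar(_s: str):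
--         _result = []
--         for _i in _s.split("."):
--             _result.append(_i.split("$")[-1])
--         return ".".join(_result)
--
--     _handler = {
--         "normal": PredictAndParse(lambda _: True, lambda _s: _s),
--         # codeql uses Kt for class Name
--         "removeKt": PredictAndParse(lambda _: True, lambda _s: _s.replace("Kt", "")),
--         "removeKt1": PredictAndParse(someEleContainsKt, removeEleContainsKt),
--         "remove str before $": PredictAndParse(containsDollar, removeStrBeforeDollar),
--         # inner class or kotlin generated property method handle
--         "$ to .": PredictAndParse(lambda _s: "$private" not in _s, lambda _s: _s.replace("$", ".")),
--         "remove$private": PredictAndParse(has_private, lambda _s: _s.replace("$private", "")),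
--         "getterBack": PredictAndParse([has_private, is_getter], getterBack0),
--         "getterBack1": PredictAndParse([has_private, is_getter], getterBack1),
--         "setterBack": PredictAndParse([has_private, is_setter], setterBack0),
--         "setterBack1": PredictAndParse([has_private, is_setter], setterBack1),
--         "removeLast": PredictAndParse(lambda _: True, lambda _s: _s.replace(f".{_l[-1]}", "")),
--         "addLast": PredictAndParse(lambda _: True, lambda _s: _s + f".{_l[-1]}"),
--     }
--
--     return handle(_name, _handler)
-- ===== SOURCE B (Python) =====
-- def hardcoded_name_resolve(_name: str) -> set:
--     last = _name.split(".")[-1]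
--     cands = [_name, _name.replace("Kt", "")]
--     if any(seg.endswith("Kt") for seg in _name.split(".")):
--         dotted = _name.replace("$", ".")
--         cands.append(".".join(s for s in dotted.split(".") if not s.endswith("Kt")))
--     if "$" in _name:
--         cands.append(".".join(seg.split("$")[-1] for seg in _name.split(".")))
--     if "$private" not in _name:
--         cands.append(_name.replace("$", "."))
--     else:
--         stripped = _name.replace("$private", "")
--         parts = stripped.split(".")
--         head, slast = parts[:-1], parts[-1]
--         cands.append(stripped)
--         if slast.startswith("get"):
--             g = slast.replace("get", "")
--             cands.append(".".join(head + [g.replace(g[0], g[0].lower())]))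
--             cands.append(".".join(head + [g]))
--         if slast.startswith("set"):
--             g = slast.replace("set", "")
--             cands.append(".".join(head + [g.replace(g[0], g[0].lower())]))
--             cands.append(".".join(head + [g]))
--     cands.append(_name.replace("." + last, ""))
--     cands.append(_name + "." + last)
--     return set(cands)
-- ===== Notes on version B (the rewrite author's own statement) =====
-- stated objective: simpler
-- what changed: B drops the PredictAndParse class and the generic dict-of-handlers dispatcher and instead computes the last segment and the $private-stripped name once, building the candidate set directly with inline guards (same variants, same global-replace semantics).
import Mathlib
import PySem

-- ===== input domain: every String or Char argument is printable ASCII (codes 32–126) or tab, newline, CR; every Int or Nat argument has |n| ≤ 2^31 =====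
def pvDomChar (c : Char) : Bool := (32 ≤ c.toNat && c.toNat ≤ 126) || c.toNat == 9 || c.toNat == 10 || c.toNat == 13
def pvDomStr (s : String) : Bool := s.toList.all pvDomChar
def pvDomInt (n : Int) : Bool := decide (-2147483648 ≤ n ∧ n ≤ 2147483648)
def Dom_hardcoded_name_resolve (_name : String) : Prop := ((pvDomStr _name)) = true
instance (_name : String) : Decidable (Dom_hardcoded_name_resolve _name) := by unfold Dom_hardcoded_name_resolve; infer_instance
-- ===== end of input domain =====

-- B drops the PredictAndParse class and the generic dict-of-handlers dispatcher and builds the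
-- candidate list directly with inline guards (same values, same first-occurrence order); objective: simpler.

-- s.split(sep) for a NONEMPTY literal sep (Python raises only for sep = "", which never occurs here):
-- PySem.Str.split? is some exactly then, so the getD default is never used.
def pySplitD (s sep : String) : List String := (PySem.Str.split? s sep).getD []

-- ===== PORT A =====
-- class PredictAndParse: _predict is either one predicate or a list of predicates (Union), _parse a function
structure PAP where
  pred : Sum (String → Bool) (List (String → Bool))
  parse : String → String

-- the loop in PredictAndParse.predict for the list case: 'for _p in self._predict: if not _p(_s): return False; return True'
def PAP.predictLoop : List (String → Bool) → String → Bool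
  | [], _ => true
  | p :: ps, s => if !(p s) then false else PAP.predictLoop ps s

def PAP.predict (h : PAP) (s : String) : Bool :=
  match h.pred with
  | .inr l => PAP.predictLoop l s
  | .inl p => p s

-- def handle(_s, _handlers): result = set(); for _h in _handlers.values(): if predict: add(parse)
def handle (_s : String) (_handlers : PySem.Dict String PAP) : List String :=
  (_handlers.values).foldl
    (fun r h => if h.predict _s then PySem.Set.add r (h.parse _s) else r)
    PySem.Set.empty

def pvA_has_private (s : String) : Bool := PySem.Str.isIn "$private" s

def pvA_is_getter (s : String) : Bool :=
  PySem.Str.startswith (PySem.List.pyGetD (pySplitD (PySem.Str.replace s "$private" "") ".") (-1) "") "get"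

def pvA_is_setter (s : String) : Bool :=
  PySem.Str.startswith (PySem.List.pyGetD (pySplitD (PySem.Str.replace s "$private" "") ".") (-1) "") "set"

-- __l[-1][0] raises IndexError in Python when the segment is empty (Str.pyGet? = none); Pre_ excludes that
def pvA_getterBack0 (s : String) : String :=
  let s1 := PySem.Str.replace s "$private" ""
  let l := pySplitD s1 "."
  let l := PySem.List.pySetD l (-1) (PySem.Str.replace (PySem.List.pyGetD l (-1) "") "get" "")
  let x := PySem.List.pyGetD l (-1) ""
  let l := PySem.List.pySetD l (-1)
    (match PySem.Str.pyGet? x 0 with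
     | some c => PySem.Str.replace x (String.ofList [c]) (PySem.Str.lower (String.ofList [c]))
     | none => x)
  PySem.Str.join "." l

def pvA_setterBack0 (s : String) : String :=
  let s1 := PySem.Str.replace s "$private" ""
  let l := pySplitD s1 "."
  let l := PySem.List.pySetD l (-1) (PySem.Str.replace (PySem.List.pyGetD l (-1) "") "set" "")
  let x := PySem.List.pyGetD l (-1) ""
  let l := PySem.List.pySetD l (-1)
    (match PySem.Str.pyGet? x 0 with
     | some c => PySem.Str.replace x (String.ofList [c]) (PySem.Str.lower (String.ofList [c]))
     | none => x)
  PySem.Str.join "." l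

def pvA_getterBack1 (s : String) : String :=
  let s1 := PySem.Str.replace s "$private" ""
  let l := pySplitD s1 "."
  let l := PySem.List.pySetD l (-1) (PySem.Str.replace (PySem.List.pyGetD l (-1) "") "get" "")
  let x := PySem.List.pyGetD l (-1) ""
  let l := PySem.List.pySetD l (-1)
    (match PySem.Str.pyGet? x 0 with
     | some c => PySem.Str.replace x (String.ofList [c]) (String.ofList [c])
     | none => x)
  PySem.Str.join "." l

def pvA_setterBack1 (s : String) : String :=
  let s1 := PySem.Str.replace s "$private" ""
  let l := pySplitD s1 "."
  let l := PySem.List.pySetD l (-1) (PySem.Str.replace (PySem.List.pyGetD l (-1) "") "set" "")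
  let x := PySem.List.pyGetD l (-1) ""
  let l := PySem.List.pySetD l (-1)
    (match PySem.Str.pyGet? x 0 with
     | some c => PySem.Str.replace x (String.ofList [c]) (String.ofList [c])
     | none => x)
  PySem.Str.join "." l

def pvA_someEleContainsKt (s : String) : Bool :=
  (pySplitD s ".").any (fun i => PySem.Str.endswith i "Kt")

def pvA_removeEleContainsKt (s : String) : String :=
  let s1 := PySem.Str.replace s "$" "."
  PySem.Str.join "." ((pySplitD s1 ".").filter (fun t => !PySem.Str.endswith t "Kt"))

def pvA_containsDollar (s : String) : Bool := PySem.Str.isIn "$" s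

def pvA_removeStrBeforeDollar (s : String) : String :=
  PySem.Str.join "."
    ((pySplitD s ".").foldl (fun acc i => acc ++ [PySem.List.pyGetD (pySplitD i "$") (-1) ""]) [])

-- the _handler dict literal; it closes over _l = _name.split(".")
def pvA_handler (_l : List String) : PySem.Dict String PAP :=
  PySem.Dict.ofList [
    ("normal", ⟨Sum.inl (fun _ => true), fun s => s⟩),
    ("removeKt", ⟨Sum.inl (fun _ => true), fun s => PySem.Str.replace s "Kt" ""⟩),
    ("removeKt1", ⟨Sum.inl pvA_someEleContainsKt, pvA_removeEleContainsKt⟩),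
    ("remove str before $", ⟨Sum.inl pvA_containsDollar, pvA_removeStrBeforeDollar⟩),
    ("$ to .", ⟨Sum.inl (fun s => !PySem.Str.isIn "$private" s), fun s => PySem.Str.replace s "$" "."⟩),
    ("remove$private", ⟨Sum.inl pvA_has_private, fun s => PySem.Str.replace s "$private" ""⟩),
    ("getterBack", ⟨Sum.inr [pvA_has_private, pvA_is_getter], pvA_getterBack0⟩),
    ("getterBack1", ⟨Sum.inr [pvA_has_private, pvA_is_getter], pvA_getterBack1⟩),
    ("setterBack", ⟨Sum.inr [pvA_has_private, pvA_is_setter], pvA_setterBack0⟩),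
    ("setterBack1", ⟨Sum.inr [pvA_has_private, pvA_is_setter], pvA_setterBack1⟩),
    ("removeLast", ⟨Sum.inl (fun _ => true),
       fun s => PySem.Str.replace s ("." ++ PySem.List.pyGetD _l (-1) "") ""⟩),
    ("addLast", ⟨Sum.inl (fun _ => true),
       fun s => s ++ "." ++ PySem.List.pyGetD _l (-1) ""⟩)]

def hardcoded_name_resolve (_name : String) : List String :=
  handle _name (pvA_handler (pySplitD _name "."))

-- ===== PORT B =====
-- the two 'cands.append(".".join(head + [...]))' lines of a getter/setter branch in Source B;
-- g[0] raises IndexError in Python when g = "" (Str.pyGet? = none); Pre_ excludes that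
def pvB_backs (head : List String) (g : String) : List String :=
  match PySem.Str.pyGet? g 0 with
  | some c =>
      [PySem.Str.join "." (head ++ [PySem.Str.replace g (String.ofList [c]) (PySem.Str.lower (String.ofList [c]))]),
       PySem.Str.join "." (head ++ [g])]
  | none => []

def hardcoded_name_resolve_alt (_name : String) : List String :=
  let last := PySem.List.pyGetD (pySplitD _name ".") (-1) ""
  let cands := [_name, PySem.Str.replace _name "Kt" ""]
  let cands := cands ++
    (if (pySplitD _name ".").any (fun i => PySem.Str.endswith i "Kt") then
      [PySem.Str.join "."
        ((pySplitD (PySem.Str.replace _name "$" ".") ".").filter (fun t => !PySem.Str.endswith t "Kt"))]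
     else [])
  let cands := cands ++
    (if PySem.Str.isIn "$" _name then
      [PySem.Str.join "." ((pySplitD _name ".").map (fun i => PySem.List.pyGetD (pySplitD i "$") (-1) ""))]
     else [])
  let cands := cands ++
    (if !PySem.Str.isIn "$private" _name then [PySem.Str.replace _name "$" "."]
     else
      let stripped := PySem.Str.replace _name "$private" ""
      let parts := pySplitD stripped "."
      let head := PySem.List.slice parts none (some (-1))
      let slast := PySem.List.pyGetD parts (-1) ""
      [stripped]
      ++ (if PySem.Str.startswith slast "get" then pvB_backs head (PySem.Str.replace slast "get" "") else [])
      ++ (if PySem.Str.startswith slast "set" then pvB_backs head (PySem.Str.replace slast "set" "") else []))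
  let cands := cands ++ [PySem.Str.replace _name ("." ++ last) "", _name ++ "." ++ last]
  PySem.Set.ofList cands

-- ===== PRECONDITION & SPEC =====
-- Pre_ excludes exactly the inputs on which A raises IndexError: _name contains "$private" and,
-- after stripping "$private", the last dot-segment is a nonempty repetition of "get" (or of "set"),
-- so that removing all "get"/"set" leaves an empty segment whose [0] Python then indexes.
def Pre_hardcoded_name_resolve (_name : String) : Prop :=
  ¬ (PySem.Str.isIn "$private" _name = true ∧
     ((PySem.Str.startswith (PySem.List.pyGetD (pySplitD (PySem.Str.replace _name "$private" "") ".") (-1) "") "get" = true ∧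
       PySem.Str.replace (PySem.List.pyGetD (pySplitD (PySem.Str.replace _name "$private" "") ".") (-1) "") "get" "" = "") ∨
      (PySem.Str.startswith (PySem.List.pyGetD (pySplitD (PySem.Str.replace _name "$private" "") ".") (-1) "") "set" = true ∧
       PySem.Str.replace (PySem.List.pyGetD (pySplitD (PySem.Str.replace _name "$private" "") ".") (-1) "") "set" "" = "")))
instance (_name : String) : Decidable (Pre_hardcoded_name_resolve _name) := by
  unfold Pre_hardcoded_name_resolve; infer_instance

def pvWitness_hardcoded_name_resolve : String := "a$private.getName"

def Spec_hardcoded_name_resolve (_name : String) (out : List String) : Prop := out = hardcoded_name_resolve_alt _name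
instance (_name : String) (out : List String) : Decidable (Spec_hardcoded_name_resolve _name out) := by unfold Spec_hardcoded_name_resolve; infer_instance

-- ===== CLAIM (what is proved, stated in full; the proofs are below) =====
def Claim_equal_hardcoded_name_resolve : Prop := ∀ (_name : String), Dom_hardcoded_name_resolve _name → Pre_hardcoded_name_resolve _name → Spec_hardcoded_name_resolve _name (hardcoded_name_resolve _name)

-- ===== LEMMAS AND PROOFS =====

-- splitOn never returns the empty list (Python s.split(sep) always has at least one piece)
lemma pvGo_ne_nil (sep : List Char) :
    ∀ (fuel : Nat) (l cur : List Char) (acc : List (List Char)),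
      PySem.Chars.splitOn.go sep fuel l cur acc ≠ [] := by
  intro fuel
  induction fuel with
  | zero => intro l cur acc; simp [PySem.Chars.splitOn.go]
  | succ n ih =>
    intro l cur acc
    cases l with
    | nil => simp [PySem.Chars.splitOn.go]
    | cons c rest =>
      rw [PySem.Chars.splitOn.go]
      split
      · exact ih _ _ _
      · exact ih _ _ _

lemma pvSplitD_ne_nil (s : String) : pySplitD s "." ≠ [] := by
  unfold pySplitD
  simp [PySem.Str.split?, PySem.Chars.split?, PySem.Chars.splitOn]
  exact pvGo_ne_nil _ _ _ _ _

-- Python's __l[-1] = v on a nonempty list replaces the last element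
lemma pvSetLast {α : Type} (l : List α) (h : l ≠ []) (v : α) :
    PySem.List.pySetD l (-1) v = l.dropLast ++ [v] := by
  have hlen : 0 < l.length := List.length_pos_iff.mpr h
  simp only [PySem.List.pySetD, PySem.List.pySet?, PySem.List.pyIdx?]
  rw [if_neg (by norm_num), if_pos (by omega : -(l.length : Int) ≤ -1)]
  simp only [Option.map_some, Option.getD_some, neg_neg, Int.toNat_one]
  rw [List.set_eq_take_append_cons_drop, if_pos (by omega : l.length - 1 < l.length),
    show l.length - 1 + 1 = l.length by omega]
  simp [List.dropLast_eq_take]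

-- the values of the handler dict, in insertion order (all 12 keys are distinct)
lemma pvA_values (_l : List String) : (pvA_handler _l).values =
  [⟨Sum.inl (fun _ => true), fun s => s⟩,
   ⟨Sum.inl (fun _ => true), fun s => PySem.Str.replace s "Kt" ""⟩,
   ⟨Sum.inl pvA_someEleContainsKt, pvA_removeEleContainsKt⟩,
   ⟨Sum.inl pvA_containsDollar, pvA_removeStrBeforeDollar⟩,
   ⟨Sum.inl (fun s => !PySem.Str.isIn "$private" s), fun s => PySem.Str.replace s "$" "."⟩,
   ⟨Sum.inl pvA_has_private, fun s => PySem.Str.replace s "$private" ""⟩,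
   ⟨Sum.inr [pvA_has_private, pvA_is_getter], pvA_getterBack0⟩,
   ⟨Sum.inr [pvA_has_private, pvA_is_getter], pvA_getterBack1⟩,
   ⟨Sum.inr [pvA_has_private, pvA_is_setter], pvA_setterBack0⟩,
   ⟨Sum.inr [pvA_has_private, pvA_is_setter], pvA_setterBack1⟩,
   ⟨Sum.inl (fun _ => true), fun s => PySem.Str.replace s ("." ++ PySem.List.pyGetD _l (-1) "") ""⟩,
   ⟨Sum.inl (fun _ => true), fun s => s ++ "." ++ PySem.List.pyGetD _l (-1) ""⟩] := rfl

lemma pvSetLastSplit (s v : String) :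
    PySem.List.pySetD (pySplitD s ".") (-1) v = (pySplitD s ".").dropLast ++ [v] :=
  pvSetLast _ (pvSplitD_ne_nil s) v

lemma pvSetLastApp (l : List String) (g v : String) :
    PySem.List.pySetD (l ++ [g]) (-1) v = l ++ [v] := by
  rw [pvSetLast _ (by simp) v]; simp

lemma pvGet0_some (s : String) (h : s ≠ "") : ∃ c, PySem.Str.pyGet? s 0 = some c := by
  cases hc : PySem.Str.pyGet? s 0 with
  | some c => exact ⟨c, rfl⟩
  | none =>
    exfalso
    have hl : s.toList ≠ [] := fun hh => h (by rwa [String.toList_eq_nil_iff] at hh)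
    revert hc
    simp only [PySem.Str.pyGet?]
    cases hd : s.toList with
    | nil => exact absurd hd hl
    | cons a t => simp [PySem.List.pyGet?, PySem.List.pyIdx?]

-- Python's s.replace(a, a) is the identity (the no-op getterBack1/setterBack1 transforms)
lemma pvReplaceGo_self (old : List Char) :
    ∀ (fuel : Nat) (l acc : List Char),
      PySem.Chars.replace.go old old fuel l acc = acc.reverse ++ l := by
  intro fuel
  induction fuel with
  | zero => intro l acc; simp [PySem.Chars.replace.go]
  | succ m ih =>
    intro l acc
    cases l with
    | nil => simp [PySem.Chars.replace.go]
    | cons c t =>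
      simp only [PySem.Chars.replace.go]
      split_ifs with hpre
      · rw [ih]
        obtain ⟨r, hr⟩ := List.isPrefixOf_iff_prefix.mp hpre
        rw [← hr]
        simp
      · rw [ih]; simp

lemma pvReplace_self (x c : String) : PySem.Str.replace x c c = x := by
  rw [PySem.Str.replace, PySem.Chars.replace]
  split
  · next he =>
    rw [List.isEmpty_iff] at he
    rw [he]
    have hfl : (List.map (fun c => [c]) x.toList).flatten = x.toList := by
      induction x.toList with
      | nil => simp
      | cons a t iht => simp [iht]
    simp [List.flatMap, hfl]
  · rw [pvReplaceGo_self]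
    simp

set_option maxHeartbeats 1600000 in
theorem hardcoded_name_resolve_spec : Claim_equal_hardcoded_name_resolve := by
  intro n hdom hpre
  unfold Pre_hardcoded_name_resolve at hpre
  unfold Spec_hardcoded_name_resolve
  rw [hardcoded_name_resolve, hardcoded_name_resolve_alt, handle, pvA_values]
  rw [PySem.Set.ofList_eq_foldl]
  by_cases hpriv : PySem.Str.isIn "$private" n = true
  · by_cases hget : PySem.Str.startswith (PySem.List.pyGetD (pySplitD (PySem.Str.replace n "$private" "") ".") (-1) "") "get" = true
    · have hg : PySem.Str.replace (PySem.List.pyGetD (pySplitD (PySem.Str.replace n "$private" "") ".") (-1) "") "get" "" ≠ "" :=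
        fun he => hpre ⟨hpriv, Or.inl ⟨hget, he⟩⟩
      obtain ⟨cg, hcg⟩ := pvGet0_some _ hg
      by_cases hset : PySem.Str.startswith (PySem.List.pyGetD (pySplitD (PySem.Str.replace n "$private" "") ".") (-1) "") "set" = true
      · have hs : PySem.Str.replace (PySem.List.pyGetD (pySplitD (PySem.Str.replace n "$private" "") ".") (-1) "") "set" "" ≠ "" :=
          fun he => hpre ⟨hpriv, Or.inr ⟨hset, he⟩⟩
        obtain ⟨cs, hcs⟩ := pvGet0_some _ hs
        by_cases hdol : PySem.Str.isIn "$" n = true <;>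
        by_cases hkt : (pySplitD n ".").any (fun i => PySem.Str.endswith i "Kt") = true <;>
        (simp only [List.foldl, PAP.predict, PAP.predictLoop, pvA_has_private, pvA_containsDollar,
            pvA_someEleContainsKt, pvA_is_getter, pvA_is_setter, hpriv, hget, hset, hdol, hkt,
            Bool.not_true, Bool.not_false, if_true, if_false, Bool.false_eq_true, Bool.not_eq_true];
          (try simp only [pvA_getterBack0, pvA_getterBack1, pvA_setterBack0, pvA_setterBack1,
            pvSetLastSplit, pvSetLastApp, PySem.List.pyGetD_neg_one_append_singleton]);
          simp only [pvB_backs, PySem.List.slice_to_neg_one,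
            pvA_removeEleContainsKt, pvA_removeStrBeforeDollar,
            PySem.List.foldl_append_singleton_eq_map, pvReplace_self, PySem.Set.empty,
            List.cons_append, List.nil_append, List.append_nil, List.foldl, hcg, hcs])
      · by_cases hdol : PySem.Str.isIn "$" n = true <;>
        by_cases hkt : (pySplitD n ".").any (fun i => PySem.Str.endswith i "Kt") = true <;>
        (simp only [List.foldl, PAP.predict, PAP.predictLoop, pvA_has_private, pvA_containsDollar,
            pvA_someEleContainsKt, pvA_is_getter, pvA_is_setter, hpriv, hget, hset, hdol, hkt,
            Bool.not_true, Bool.not_false, if_true, if_false, Bool.false_eq_true, Bool.not_eq_true];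
          (try simp only [pvA_getterBack0, pvA_getterBack1, pvA_setterBack0, pvA_setterBack1,
            pvSetLastSplit, pvSetLastApp, PySem.List.pyGetD_neg_one_append_singleton]);
          simp only [pvB_backs, PySem.List.slice_to_neg_one,
            pvA_removeEleContainsKt, pvA_removeStrBeforeDollar,
            PySem.List.foldl_append_singleton_eq_map, pvReplace_self, PySem.Set.empty,
            List.cons_append, List.nil_append, List.append_nil, List.foldl, hcg])
    · by_cases hset : PySem.Str.startswith (PySem.List.pyGetD (pySplitD (PySem.Str.replace n "$private" "") ".") (-1) "") "set" = true
      · have hs : PySem.Str.replace (PySem.List.pyGetD (pySplitD (PySem.Str.replace n "$private" "") ".") (-1) "") "set" "" ≠ "" :=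
          fun he => hpre ⟨hpriv, Or.inr ⟨hset, he⟩⟩
        obtain ⟨cs, hcs⟩ := pvGet0_some _ hs
        by_cases hdol : PySem.Str.isIn "$" n = true <;>
        by_cases hkt : (pySplitD n ".").any (fun i => PySem.Str.endswith i "Kt") = true <;>
        (simp only [List.foldl, PAP.predict, PAP.predictLoop, pvA_has_private, pvA_containsDollar,
            pvA_someEleContainsKt, pvA_is_getter, pvA_is_setter, hpriv, hget, hset, hdol, hkt,
            Bool.not_true, Bool.not_false, if_true, if_false, Bool.false_eq_true, Bool.not_eq_true];
          (try simp only [pvA_getterBack0, pvA_getterBack1, pvA_setterBack0, pvA_setterBack1,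
            pvSetLastSplit, pvSetLastApp, PySem.List.pyGetD_neg_one_append_singleton]);
          simp only [pvB_backs, PySem.List.slice_to_neg_one,
            pvA_removeEleContainsKt, pvA_removeStrBeforeDollar,
            PySem.List.foldl_append_singleton_eq_map, pvReplace_self, PySem.Set.empty,
            List.cons_append, List.nil_append, List.append_nil, List.foldl, hcs])
      · by_cases hdol : PySem.Str.isIn "$" n = true <;>
        by_cases hkt : (pySplitD n ".").any (fun i => PySem.Str.endswith i "Kt") = true <;>
        (simp only [List.foldl, PAP.predict, PAP.predictLoop, pvA_has_private, pvA_containsDollar,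
            pvA_someEleContainsKt, pvA_is_getter, pvA_is_setter, hpriv, hget, hset, hdol, hkt,
            Bool.not_true, Bool.not_false, if_true, if_false, Bool.false_eq_true, Bool.not_eq_true];
          (try simp only [pvA_getterBack0, pvA_getterBack1, pvA_setterBack0, pvA_setterBack1,
            pvSetLastSplit, pvSetLastApp, PySem.List.pyGetD_neg_one_append_singleton]);
          simp only [pvB_backs, PySem.List.slice_to_neg_one,
            pvA_removeEleContainsKt, pvA_removeStrBeforeDollar,
            PySem.List.foldl_append_singleton_eq_map, pvReplace_self, PySem.Set.empty,
            List.cons_append, List.nil_append, List.append_nil, List.foldl])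
  · by_cases hdol : PySem.Str.isIn "$" n = true <;>
    by_cases hkt : (pySplitD n ".").any (fun i => PySem.Str.endswith i "Kt") = true <;>
    (simp only [List.foldl, PAP.predict, PAP.predictLoop, pvA_has_private, pvA_containsDollar,
        pvA_someEleContainsKt, pvA_is_getter, pvA_is_setter, hpriv, hdol, hkt,
        Bool.not_true, Bool.not_false, if_true, if_false, Bool.false_eq_true, Bool.not_eq_true];
      (try simp only [pvA_getterBack0, pvA_getterBack1, pvA_setterBack0, pvA_setterBack1,
        pvSetLastSplit, pvSetLastApp, PySem.List.pyGetD_neg_one_append_singleton]);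
      simp only [pvB_backs, PySem.List.slice_to_neg_one,
        pvA_removeEleContainsKt, pvA_removeStrBeforeDollar,
        PySem.List.foldl_append_singleton_eq_map, pvReplace_self, PySem.Set.empty,
        List.cons_append, List.nil_append, List.append_nil, List.foldl])
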